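-- pv_equiv track=rewrite | github.com/roctbb/ai-game-engine | games/farm_grid/engine.py | _settle_apples
-- ===== SOURCE A (Python) =====
-- def _settle_apples(board: list[list[str]]) -> list[list[str]]:
--     out = [col[:] for col in board]
--     width = len(out); height = len(out[0]) if width else 0
--     changed = True
--     while changed:
--         changed = False
--         for x in range(width):
--             for y in range(height - 2, -1, -1):
--                 if out[x][y] == "A" and out[x][y + 1] == ".":
--                     out[x][y], out[x][y + 1] = ".", "A"
--                     changed = True
--     return out
-- ===== SOURCE B (Python) =====
-- def _settle_apples(board: list[list[str]]) -> list[list[str]]: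
--     out = [list(col) for col in board]
--     height = len(out[0]) if out else 0
--     for col in out:
--         start = 0
--         apples = 0
--         for y in range(height):
--             if col[y] == "A":
--                 apples += 1
--             elif col[y] != ".":
--                 col[start:y] = ["."] * (y - start - apples) + ["A"] * apples
--                 start, apples = y + 1, 0
--         col[start:height] = ["."] * (height - start - apples) + ["A"] * apples
--     return out
-- ===== Notes on version B (the rewrite author's own statement) =====
-- stated objective: alternative
-- what changed: A repeatedly sweeps every column swapping adjacent apple/dot pairs until a full sweep changes nothing; B scans each column once, counting the apples of the current barrier-delimited segment and rewriting the segment as dots-then-apples in place. Pre_ excludes boards with a column shorter than the grid height (the first column's length): A raises IndexError there whenever the height is at least 2, and B raises on all of them, including the degenerate height-1 boards with an empty column where A's empty sweep accidentally returns the board unchanged.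
-- outside the precondition, e.g. on _settle_apples([['A'], []]): A returns [['A'], []], B raises IndexError
import Mathlib
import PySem

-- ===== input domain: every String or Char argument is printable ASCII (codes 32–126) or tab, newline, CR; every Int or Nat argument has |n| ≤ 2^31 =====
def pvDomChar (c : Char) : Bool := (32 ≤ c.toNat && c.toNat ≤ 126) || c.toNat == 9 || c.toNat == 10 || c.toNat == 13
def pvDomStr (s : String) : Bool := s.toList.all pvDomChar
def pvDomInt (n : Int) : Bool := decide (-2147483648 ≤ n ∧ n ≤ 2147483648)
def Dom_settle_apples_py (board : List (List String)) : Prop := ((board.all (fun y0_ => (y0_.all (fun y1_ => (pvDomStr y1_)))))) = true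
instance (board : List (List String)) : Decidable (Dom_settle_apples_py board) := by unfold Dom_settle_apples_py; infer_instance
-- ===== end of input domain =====

-- B replaces A's repeat-until-no-change sweeps by one counting pass per column
-- (a different algorithm, not measured faster); A mutates only a local copy of its input.

-- ===== PORT A =====
-- One inner 'for y in range(height-2,-1,-1)' sweep over the first `height` cells of a
-- column: pairs are visited bottom-up, which is exactly "recurse on the tail first,
-- then look at the top pair".  Returns (new cells, changed flag).
def passA : List String → List String × Bool
  | [] => ([], false)
  | [a] => ([a], false)
  | a :: b :: rs =>
    match passA (b :: rs) with
    | (b' :: rs', c) =>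
      if a = "A" ∧ b' = "." then ("." :: "A" :: rs', true) else (a :: b' :: rs', c)
    | ([], c) => ([a], c)   -- unreachable: passA preserves length

-- the 'for x in range(width)' sweep over all columns, or-ing the changed flags.
-- Python indexes each column by the FIRST column's height; on Pre_ (rectangular
-- boards) that is the column's own length, so acting on `take h` with the untouched
-- `drop h` re-appended is exact there.
def sweepA (h : Nat) : List (List String) → List (List String) × Bool
  | [] => ([], false)
  | col :: rest =>
    let p := passA (List.take h col)
    let q := sweepA h rest
    ((p.1 ++ List.drop h col) :: q.1, p.2 || q.2)

-- the 'while changed' loop; fuel only makes it total (Σ len(col)^2 + 1 sweeps always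
-- suffice, proved below), the stop condition is the changed flag exactly as in Python.
def loopA (h : Nat) : Nat → List (List String) → List (List String)
  | 0, b => b
  | f + 1, b =>
    let s := sweepA h b
    if s.2 then loopA h f s.1 else b

def settle_apples_py (board : List (List String)) : List (List String) :=
  loopA (board.headD []).length ((board.map (fun c => c.length * c.length)).sum + 1) board

-- ===== PORT B =====
-- one scan per column over the grid height: count the apples of the current
-- barrier-delimited segment; on a barrier rewrite the segment in place as
-- dots-then-apples (the Python slice assignment col[start:y] = …)
def stepAltB (st : List String × Nat × Nat) (y : Nat) : List String × Nat × Nat :=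
  let (col, start, a) := st
  let c := col.getD y ""
  if c = "A" then (col, start, a + 1)
  else if c = "." then (col, start, a)
  else (col.take start ++ List.replicate (y - start - a) "." ++ List.replicate a "A" ++ col.drop y,
        y + 1, 0)

def settleColAlt (h : Nat) (col : List String) : List String :=
  let st := (List.range h).foldl stepAltB (col, 0, 0)
  st.1.take st.2.1 ++ List.replicate (h - st.2.1 - st.2.2) "." ++ List.replicate st.2.2 "A" ++
    st.1.drop h

def settle_apples_py_alt (board : List (List String)) : List (List String) :=
  board.map (settleColAlt (board.headD []).length)

-- ===== PRECONDITION & SPEC =====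
-- Pre_ excludes the boards with a column shorter than the grid height (the first
-- column's length): A raises IndexError on all of them with height ≥ 2, and B raises
-- on all of them, including the degenerate height-1 boards with an empty column where
-- A's empty sweep accidentally returns the board unchanged.
def Pre_settle_apples_py (board : List (List String)) : Prop :=
  ∀ col ∈ board, (board.headD []).length ≤ col.length
instance (board : List (List String)) : Decidable (Pre_settle_apples_py board) := by
  unfold Pre_settle_apples_py; infer_instance

def pvWitness_settle_apples_py : List (List String) := [["A", ".", "#"], [".", "A", "."]]

def Spec_settle_apples_py (board : List (List String)) (out : List (List String)) : Prop := out = settle_apples_py_alt board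
instance (board : List (List String)) (out : List (List String)) : Decidable (Spec_settle_apples_py board out) := by unfold Spec_settle_apples_py; infer_instance

-- ===== CLAIM (what is proved, stated in full; the proofs are below) =====
def Claim_equal_settle_apples_py : Prop := ∀ (board : List (List String)), Dom_settle_apples_py board → Pre_settle_apples_py board → Spec_settle_apples_py board (settle_apples_py board)

-- ===== LEMMAS AND PROOFS =====

-- canonical settled column, recursive characterisation of B's fold
def insA : Nat → List String → List String
  | n, [] => List.replicate n "A"
  | n, c :: t => if c = "." then "." :: insA n t else List.replicate n "A" ++ c :: t

def settleC : List String → List String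
  | [] => []
  | c :: t =>
    if c = "." then "." :: settleC t
    else if c = "A" then insA 1 (settleC t)
    else c :: settleC t

def countA : List String → Nat
  | [] => 0
  | c :: t => (if c = "A" then 1 else 0) + countA t

-- potential: sum of the indices of the apples (each swap of A above '.' raises it by 1)
def phi : List String → Nat
  | [] => 0
  | _ :: t => phi t + countA t

theorem settleC_dot (t : List String) : settleC ("." :: t) = "." :: settleC t := by
  rw [settleC]; simp

theorem settleC_A (t : List String) : settleC ("A" :: t) = insA 1 (settleC t) := by
  rw [settleC, if_neg (by decide : ¬ ("A" : String) = "."), if_pos rfl]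

theorem settleC_bar (c : String) (t : List String) (h1 : ¬ c = ".") (h2 : ¬ c = "A") :
    settleC (c :: t) = c :: settleC t := by
  rw [settleC, if_neg h1, if_neg h2]

theorem insA_dot (n : Nat) (t : List String) : insA n ("." :: t) = "." :: insA n t := by
  rw [insA]; simp

theorem insA_zero : ∀ l, insA 0 l = l
  | [] => rfl
  | c :: t => by
    by_cases h : c = "."
    · simp [insA, h, insA_zero t]
    · simp [insA, h]

theorem repA_cons : ∀ (n : Nat) (l : List String),
    List.replicate n "A" ++ "A" :: l = "A" :: (List.replicate n "A" ++ l)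
  | 0, l => rfl
  | n + 1, l => by simp [List.replicate_succ, repA_cons n l]

theorem insA_insA (a : Nat) : ∀ l, insA a (insA 1 l) = insA (a + 1) l
  | [] => by
    simp [insA, List.replicate_succ]
    simpa using repA_cons a []
  | c :: t => by
    by_cases h : c = "."
    · simp [insA, h, insA_insA a t]
    · have hA : ¬ ("A" : String) = "." := by decide
      simp [insA, h, hA, List.replicate_succ, repA_cons]

-- ---- properties of one sweep of a column ----

theorem passA_length : ∀ col, (passA col).1.length = col.length
  | [] => rfl
  | [a] => rfl
  | a :: b :: rs => by
    have ih := passA_length (b :: rs)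
    simp only [passA]
    cases h : passA (b :: rs) with
    | mk l c =>
      rw [h] at ih
      cases l with
      | nil => simp at ih
      | cons b' rs' =>
        by_cases hs : a = "A" ∧ b' = "."
        · simp only [if_pos hs]; simpa using ih
        · simp only [if_neg hs]; simpa using ih

theorem passA_countA : ∀ col, countA (passA col).1 = countA col
  | [] => rfl
  | [a] => rfl
  | a :: b :: rs => by
    have ih := passA_countA (b :: rs)
    simp only [passA]
    cases h : passA (b :: rs) with
    | mk l c =>
      rw [h] at ih
      have hlen := passA_length (b :: rs); rw [h] at hlen
      cases l with
      | nil => simp at hlen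
      | cons b' rs' =>
        by_cases hs : a = "A" ∧ b' = "."
        · simp only [if_pos hs, countA] at ih ⊢
          have hA : ¬ ("." : String) = "A" := by decide
          simp [hs.1, hs.2, hA] at ih ⊢; omega
        · simp only [if_neg hs, countA] at ih ⊢; omega

theorem passA_false_eq : ∀ col, (passA col).2 = false → (passA col).1 = col
  | [], _ => rfl
  | [a], _ => rfl
  | a :: b :: rs, hf => by
    have ih := passA_false_eq (b :: rs)
    simp only [passA] at hf ⊢
    cases h : passA (b :: rs) with
    | mk l c =>
      rw [h] at ih hf
      have hlen := passA_length (b :: rs); rw [h] at hlen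
      cases l with
      | nil => simp at hlen
      | cons b' rs' =>
        by_cases hs : a = "A" ∧ b' = "."
        · simp [if_pos hs] at hf
        · simp only [if_neg hs] at hf ⊢
          simpa using ih hf

theorem insA_cons_ne (n : Nat) (c : String) (t : List String) (h : ¬ c = ".") :
    insA n (c :: t) = List.replicate n "A" ++ c :: t := by simp [insA, h]

theorem passA_false_settled : ∀ col, (passA col).2 = false → settleC col = col
  | [], _ => rfl
  | [a], _ => by
    by_cases h1 : a = "."
    · simp [settleC, h1]
    · by_cases h2 : a = "A" <;> simp [settleC, h1, h2, insA]
  | a :: b :: rs, hf => by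
    have ih := passA_false_settled (b :: rs)
    simp only [passA] at hf
    cases h : passA (b :: rs) with
    | mk l c =>
      rw [h] at hf
      have hlen := passA_length (b :: rs); rw [h] at hlen
      cases l with
      | nil => simp at hlen
      | cons b' rs' =>
        by_cases hs : a = "A" ∧ b' = "."
        · simp [if_pos hs] at hf
        · simp only [if_neg hs] at hf
          have hceq : c = false := by simpa using hf
          have heq : b' :: rs' = b :: rs := by
            have := passA_false_eq (b :: rs) (by rw [h]; simpa using hceq)
            rw [h] at this; simpa using this
          have hset : settleC (b :: rs) = b :: rs := ih (by rw [h]; simpa using hceq)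
          by_cases h1 : a = "."
          · rw [h1, settleC_dot, hset]
          · by_cases h2 : a = "A"
            · have hb : ¬ b = "." := by
                intro hb; exact hs ⟨h2, by injection heq with e _; rw [e, hb]⟩
              rw [h2, settleC_A, hset, insA_cons_ne 1 b rs hb]
              simp [List.replicate_succ]
            · rw [settleC_bar a _ h1 h2, hset]

theorem passA_settle : ∀ col, settleC (passA col).1 = settleC col
  | [] => rfl
  | [a] => rfl
  | a :: b :: rs => by
    have ih := passA_settle (b :: rs)
    simp only [passA]
    cases h : passA (b :: rs) with
    | mk l c =>
      rw [h] at ih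
      have hlen := passA_length (b :: rs); rw [h] at hlen
      cases l with
      | nil => simp at hlen
      | cons b' rs' =>
        by_cases hs : a = "A" ∧ b' = "."
        · simp only [if_pos hs]
          have hih : "." :: settleC rs' = settleC (b :: rs) := by
            rw [← ih, hs.2, settleC_dot]
          show settleC ("." :: "A" :: rs') = settleC (a :: b :: rs)
          rw [hs.1, settleC_dot, settleC_A, settleC_A, ← hih, insA_dot]
        · simp only [if_neg hs]
          show settleC (a :: b' :: rs') = settleC (a :: b :: rs)
          by_cases h1 : a = "."
          · rw [h1, settleC_dot, settleC_dot, ih]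
          · by_cases h2 : a = "A"
            · rw [h2, settleC_A, settleC_A, ih]
            · rw [settleC_bar a _ h1 h2, settleC_bar a _ h1 h2, ih]

theorem passA_phi_ge : ∀ col, phi col ≤ phi (passA col).1 ∧
    ((passA col).2 = true → phi col + 1 ≤ phi (passA col).1)
  | [] => ⟨le_refl _, by simp [passA]⟩
  | [a] => ⟨le_refl _, by simp [passA]⟩
  | a :: b :: rs => by
    have ih := passA_phi_ge (b :: rs)
    simp only [passA]
    cases h : passA (b :: rs) with
    | mk l c =>
      rw [h] at ih
      have hcnt := passA_countA (b :: rs); rw [h] at hcnt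
      have hlen := passA_length (b :: rs); rw [h] at hlen
      cases l with
      | nil => simp at hlen
      | cons b' rs' =>
        by_cases hs : a = "A" ∧ b' = "."
        · simp only [if_pos hs]
          have hAd : ¬ ("." : String) = "A" := by decide
          have key : phi (a :: b :: rs) + 1 ≤ phi ("." :: "A" :: rs') := by
            have h1 : phi ("." :: "A" :: rs') = phi rs' + countA rs' + (1 + countA rs') := by
              simp [phi, countA]
            have h2 : phi (b' :: rs') = phi rs' + countA rs' := by
              rw [hs.2]; simp [phi]
            have h3 : countA (b' :: rs') = countA rs' := by
              rw [hs.2]; simp [countA, hAd]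
            have h4 : phi (a :: b :: rs) = phi (b :: rs) + countA (b :: rs) := rfl
            rw [h1, h4, ← hcnt, h3]
            have := ih.1; rw [h2] at this
            omega
          exact ⟨le_trans (Nat.le_succ _) key, fun _ => key⟩
        · simp only [if_neg hs]
          have ih' : phi (b :: rs) ≤ phi (b' :: rs') ∧
              (c = true → phi (b :: rs) + 1 ≤ phi (b' :: rs')) := ih
          have hcnt' : countA (b' :: rs') = countA (b :: rs) := hcnt
          have h4 : phi (a :: b :: rs) = phi (b :: rs) + countA (b :: rs) := rfl
          have h5 : phi (a :: b' :: rs') = phi (b' :: rs') + countA (b' :: rs') := rfl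
          constructor
          · show phi (a :: b :: rs) ≤ phi (a :: b' :: rs')
            rw [h4, h5, hcnt']; exact Nat.add_le_add_right ih'.1 _
          · intro hc
            have hstep := ih'.2 (by simpa using hc)
            show phi (a :: b :: rs) + 1 ≤ phi (a :: b' :: rs')
            rw [h4, h5, hcnt']; omega

theorem countA_le : ∀ col : List String, countA col ≤ col.length
  | [] => le_refl _
  | c :: t => by
    have := countA_le t
    by_cases h : c = "A" <;> simp [countA, h] <;> omega

theorem phi_le : ∀ col : List String, phi col ≤ col.length * col.length
  | [] => le_refl _
  | c :: t => by
    have h1 := phi_le t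
    have h2 := countA_le t
    simp only [phi, List.length_cons]
    nlinarith

-- ---- the per-column action of one sweep, with the grid height h ----

-- g is what sweepA does to a single column
def gcol (h : Nat) (col : List String) : List String :=
  (passA (List.take h col)).1 ++ List.drop h col

theorem take_gcol (h : Nat) (col : List String) :
    List.take h (gcol h col) = (passA (List.take h col)).1 := by
  have hl : (passA (List.take h col)).1.length = (List.take h col).length :=
    passA_length _
  rw [gcol, List.take_append]
  have h1 : List.take h (passA (List.take h col)).1 = (passA (List.take h col)).1 :=
    List.take_of_length_le (by rw [hl, List.length_take]; omega)
  rw [h1]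
  rcases Nat.le_total h col.length with hle | hle
  · have : h - (passA (List.take h col)).1.length = 0 := by
      rw [hl, List.length_take]; omega
    simp [this]
  · have : List.drop h col = [] := List.drop_eq_nil_of_le (by omega)
    simp [this]

theorem drop_gcol (h : Nat) (col : List String) :
    List.drop h (gcol h col) = List.drop h col := by
  have hl : (passA (List.take h col)).1.length = (List.take h col).length :=
    passA_length _
  rw [gcol, List.drop_append]
  have h1 : List.drop h (passA (List.take h col)).1 = [] :=
    List.drop_eq_nil_of_le (by rw [hl, List.length_take]; omega)
  rw [h1]
  rcases Nat.le_total h col.length with hle | hle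
  · have : h - (passA (List.take h col)).1.length = 0 := by
      rw [hl, List.length_take]; omega
    simp [this]
  · have h2 : List.drop h col = [] := List.drop_eq_nil_of_le (by omega)
    simp [h2]

-- ---- lifting to the whole board ----

def PhiB (h : Nat) (b : List (List String)) : Nat := (b.map (fun c => phi (List.take h c))).sum
def MaxB (h : Nat) (b : List (List String)) : Nat :=
  (b.map (fun c => (List.take h c).length * (List.take h c).length)).sum

theorem PhiB_le (h : Nat) : ∀ b, PhiB h b ≤ MaxB h b
  | [] => le_refl _
  | col :: rest => by
    have := PhiB_le h rest
    have := phi_le (List.take h col)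
    simp only [PhiB, MaxB, List.map_cons, List.sum_cons] at *
    omega

theorem MaxB_le_fuel (h : Nat) : ∀ b : List (List String),
    MaxB h b ≤ (b.map (fun c => c.length * c.length)).sum
  | [] => le_refl _
  | col :: rest => by
    have ih := MaxB_le_fuel h rest
    have h1 : (List.take h col).length ≤ col.length := by
      rw [List.length_take]; omega
    have h2 : (List.take h col).length * (List.take h col).length ≤ col.length * col.length :=
      Nat.mul_le_mul h1 h1
    simp only [MaxB, List.map_cons, List.sum_cons] at *
    omega

theorem sweep_cols (h : Nat) : ∀ b, (sweepA h b).1 = b.map (gcol h)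
  | [] => rfl
  | col :: rest => by
    simp only [sweepA, List.map_cons, sweep_cols h rest, gcol]

theorem sweep_max (h : Nat) : ∀ b, MaxB h (sweepA h b).1 = MaxB h b
  | [] => rfl
  | col :: rest => by
    have ih := sweep_max h rest
    have hc : (sweepA h (col :: rest)).1 = gcol h col :: (sweepA h rest).1 := by
      simp [sweepA, gcol]
    rw [hc]
    simp only [MaxB, List.map_cons, List.sum_cons] at *
    rw [take_gcol, passA_length, ih]

def settled (h : Nat) (col : List String) : List String :=
  settleC (List.take h col) ++ List.drop h col

theorem sweep_settle (h : Nat) (b : List (List String)) :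
    List.map (settled h) (sweepA h b).1 = List.map (settled h) b := by
  rw [sweep_cols, List.map_map]
  refine List.map_congr_left fun col _ => ?_
  simp only [Function.comp_apply, settled, take_gcol, drop_gcol, passA_settle]

theorem sweep_false (h : Nat) : ∀ b, (sweepA h b).2 = false → b = List.map (settled h) b
  | [], _ => rfl
  | col :: rest, hf => by
    simp only [sweepA, Bool.or_eq_false_iff] at hf
    have h1 : settleC (List.take h col) = List.take h col :=
      passA_false_settled _ hf.1
    have h2 := sweep_false h rest hf.2
    simp only [List.map_cons, ← h2, settled, h1, List.take_append_drop]

theorem sweep_phi (h : Nat) : ∀ b, PhiB h b ≤ PhiB h (sweepA h b).1 ∧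
    ((sweepA h b).2 = true → PhiB h b + 1 ≤ PhiB h (sweepA h b).1)
  | [] => ⟨le_refl _, by simp [sweepA]⟩
  | col :: rest => by
    have ih := sweep_phi h rest
    have hp := passA_phi_ge (List.take h col)
    have hc : (sweepA h (col :: rest)).1 = gcol h col :: (sweepA h rest).1 := by
      simp [sweepA, gcol]
    have hflag : (sweepA h (col :: rest)).2 =
        ((passA (List.take h col)).2 || (sweepA h rest).2) := by
      simp [sweepA]
    rw [hc]
    simp only [PhiB, List.map_cons, List.sum_cons, hflag, Bool.or_eq_true] at *
    rw [take_gcol]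
    constructor
    · omega
    · rintro (hh | hh)
      · have := hp.2 hh; omega
      · have := ih.2 hh; omega

theorem loop_eq (h : Nat) : ∀ (f : Nat) (b : List (List String)), MaxB h b < f + PhiB h b →
    loopA h f b = List.map (settled h) b
  | 0, b, hlt => absurd (PhiB_le h b) (by omega)
  | f + 1, b, hlt => by
    simp only [loopA]
    cases hc : (sweepA h b).2
    · simpa using sweep_false h b hc
    · have hih : MaxB h (sweepA h b).1 < f + PhiB h (sweepA h b).1 := by
        have h1 := sweep_max h b
        have h2 := (sweep_phi h b).2 hc
        omega
      simp [loop_eq h f (sweepA h b).1 hih, sweep_settle h b]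

-- ---- B: the one-scan fold equals the canonical settled column ----

theorem countA_append (xs ys : List String) : countA (xs ++ ys) = countA xs + countA ys := by
  induction xs with
  | nil => simp [countA]
  | cons c t ih => simp [countA, ih]; omega

theorem insA_repl_dots (m d : Nat) (l : List String) :
    insA m (List.replicate d "." ++ l) = List.replicate d "." ++ insA m l := by
  induction d with
  | zero => simp
  | succ d ih => simp [List.replicate_succ, insA_dot, ih]

theorem insA_one_insA (a : Nat) : ∀ l, insA 1 (insA a l) = insA (a + 1) l
  | [] => by
    cases a with
    | zero => simp [insA]
    | succ a' =>
      have h1 : insA (a' + 1) ([] : List String) = "A" :: List.replicate a' "A" := by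
        simp [insA, List.replicate_succ]
      have h2 : insA (a' + 1 + 1) ([] : List String) = "A" :: List.replicate (a' + 1) "A" := by
        simp [insA, List.replicate_succ]
      rw [h1, h2, insA_cons_ne 1 "A" (List.replicate a' "A") (by decide)]
      simp [List.replicate_succ]
  | c :: t => by
    by_cases h : c = "."
    · rw [h, insA_dot, insA_dot, insA_one_insA a t, insA_dot]
    · rw [insA_cons_ne a c t h, insA_cons_ne (a + 1) c t h]
      cases a with
      | zero => simp [insA_cons_ne 1 c t h, List.replicate_succ]
      | succ a' =>
        rw [List.replicate_succ, List.cons_append,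
          insA_cons_ne 1 "A" (List.replicate a' "A" ++ c :: t) (by decide)]
        simp [List.replicate_succ]

-- settleC over a prefix of dots/apples: the dots stay in front, the apples sink
theorem segPrefix : ∀ (seg x : List String), (∀ c ∈ seg, c = "." ∨ c = "A") →
    settleC (seg ++ x) =
      List.replicate (seg.length - countA seg) "." ++ insA (countA seg) (settleC x)
  | [], x, _ => by simp [countA, insA_zero]
  | c :: seg', x, hm => by
    have ih := segPrefix seg' x (fun d hd => hm d (List.mem_cons_of_mem _ hd))
    have hca := countA_le seg'
    rcases hm c List.mem_cons_self with hc | hc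
    · rw [List.cons_append, hc, settleC_dot, ih]
      have : countA ("." :: seg') = countA seg' := by simp [countA]
      rw [this]
      have hlen : ("." :: seg').length - countA seg' = (seg'.length - countA seg') + 1 := by
        simp; omega
      rw [hlen, List.replicate_succ]
      simp
    · rw [List.cons_append, hc, settleC_A, ih, insA_repl_dots, insA_one_insA]
      have h1 : countA ("A" :: seg') = countA seg' + 1 := by simp [countA]; omega
      rw [h1]
      have h2 : ("A" :: seg').length - (countA seg' + 1) = seg'.length - countA seg' := by
        simp
      rw [h2]

theorem getD_app (xs ys : List String) : (xs ++ ys).getD xs.length "" = ys.getD 0 "" := by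
  simp [List.getD, List.getElem?_append_right (le_refl xs.length)]

-- the invariant of B's scan: the board left of `start` is already its settled form, the
-- current segment holds `a` apples, and the remaining `k` indices are still untouched
theorem foldAlt : ∀ (k : Nat) (done seg rest : List String) (a : Nat),
    (∀ c ∈ seg, c = "." ∨ c = "A") → a = countA seg → k ≤ rest.length →
    (let st := (List.range' (done.length + seg.length) k).foldl stepAltB
        (done ++ seg ++ rest, done.length, a)
     st.1.take st.2.1 ++
       List.replicate (done.length + seg.length + k - st.2.1 - st.2.2) "." ++
       List.replicate st.2.2 "A" ++ st.1.drop (done.length + seg.length + k))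
    = done ++ settleC (seg ++ rest.take k) ++ rest.drop k
  | 0, done, seg, rest, a, hm, ha, _ => by
    have hca : countA seg ≤ seg.length := countA_le seg
    simp only [List.range'_zero, List.foldl_nil]
    have htake : (done ++ seg ++ rest).take done.length = done := by
      rw [List.append_assoc, List.take_left]
    have hdrop : (done ++ seg ++ rest).drop (done.length + seg.length) = rest := by
      rw [← List.length_append, List.drop_left]
    have hset : settleC seg =
        List.replicate (seg.length - countA seg) "." ++ List.replicate (countA seg) "A" := by
      have := segPrefix seg [] hm
      simpa [settleC] using this
    simp only [List.take_zero, List.drop_zero, List.append_nil, Nat.add_zero]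
    rw [htake, hdrop, hset, ha]
    have : done.length + seg.length - done.length - countA seg = seg.length - countA seg := by
      omega
    rw [this]
    simp [List.append_assoc]
  | k + 1, done, seg, rest, a, hm, ha, hk => by
    cases rest with
    | nil => simp at hk
    | cons r rest' =>
      have hk' : k ≤ rest'.length := by simpa using hk
      have hget : (done ++ seg ++ (r :: rest')).getD (done.length + seg.length) "" = r := by
        rw [← List.length_append, getD_app]
        simp [List.getD]
      rw [List.range'_succ, List.foldl_cons]
      by_cases h1 : r = "A"
      · have hstep : stepAltB (done ++ seg ++ r :: rest', done.length, a)
            (done.length + seg.length) = (done ++ (seg ++ ["A"]) ++ rest', done.length, a + 1) := by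
          simp only [stepAltB, hget, h1]
          simp [List.append_assoc]
        rw [hstep]
        have ih := foldAlt k done (seg ++ ["A"]) rest' (a + 1)
          (fun c hc => by
            rcases List.mem_append.mp hc with h | h
            · exact hm c h
            · simp at h; right; exact h)
          (by rw [countA_append, ← ha]; simp [countA])
          hk'
        rw [show done.length + (seg ++ ["A"]).length = done.length + seg.length + 1 from by
          simp; omega] at ih
        rw [show done.length + seg.length + 1 + k = done.length + seg.length + (k + 1) from by
          omega] at ih
        rw [ih]
        simp [List.append_assoc, h1]
      · by_cases h2 : r = "."
        · have hstep : stepAltB (done ++ seg ++ r :: rest', done.length, a)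
              (done.length + seg.length) = (done ++ (seg ++ ["."]) ++ rest', done.length, a) := by
            simp only [stepAltB, h2]
            simp [List.append_assoc]
          rw [hstep]
          have ih := foldAlt k done (seg ++ ["."]) rest' a
            (fun c hc => by
              rcases List.mem_append.mp hc with h | h
              · exact hm c h
              · simp at h; left; exact h)
            (by rw [countA_append, ← ha]; simp [countA])
            hk'
          rw [show done.length + (seg ++ ["."]).length = done.length + seg.length + 1 from by
            simp; omega] at ih
          rw [show done.length + seg.length + 1 + k = done.length + seg.length + (k + 1) from by
            omega] at ih
          rw [ih]
          simp [List.append_assoc, h2]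
        · -- barrier: flush the segment
          have hca : countA seg ≤ seg.length := countA_le seg
          have htake : (done ++ seg ++ (r :: rest')).take done.length = done := by
            rw [List.append_assoc, List.take_left]
          have hdrop : (done ++ seg ++ (r :: rest')).drop (done.length + seg.length)
              = r :: rest' := by rw [← List.length_append, List.drop_left]
          set done' : List String :=
            done ++ List.replicate (seg.length - countA seg) "." ++
              List.replicate (countA seg) "A" ++ [r] with hdone'
          have hdlen : done'.length = done.length + seg.length + 1 := by
            simp [hdone']; omega
          have hstep : stepAltB (done ++ seg ++ r :: rest', done.length, a)
              (done.length + seg.length) = (done' ++ [] ++ rest', done'.length, 0) := by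
            simp only [stepAltB, hget, h1, h2]
            rw [htake, hdrop, ha, hdlen]
            have : done.length + seg.length - done.length - countA seg
                = seg.length - countA seg := by omega
            simp [hdone', List.append_assoc]
          rw [hstep]
          have ih := foldAlt k done' [] rest' 0 (by simp) (by simp [countA]) hk'
          simp only [List.length_nil, Nat.add_zero] at ih
          rw [show done.length + seg.length + (k + 1) = done'.length + k from by
            rw [hdlen]; omega]
          rw [show done.length + seg.length + 1 = done'.length from hdlen.symm]
          rw [ih]
          have hseg : settleC (seg ++ r :: rest'.take k)
              = List.replicate (seg.length - countA seg) "." ++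
                List.replicate (countA seg) "A" ++ (r :: settleC (rest'.take k)) := by
            rw [segPrefix seg _ hm, settleC_bar r _ h2 h1, insA_cons_ne _ _ _ h2]
            simp [List.append_assoc]
          simp only [List.take_succ_cons, List.drop_succ_cons, hseg, hdone']
          simp [List.append_assoc]

theorem settleColAlt_eq (h : Nat) (col : List String) (hle : h ≤ col.length) :
    settleColAlt h col = settleC (col.take h) ++ col.drop h := by
  have key := foldAlt h [] [] col 0 (by simp) rfl hle
  simp only [List.length_nil, List.nil_append, Nat.add_zero, Nat.zero_add,
    List.append_nil] at key
  simpa [settleColAlt, List.range_eq_range'] using key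

-- ===== VERDICT (by name: the statement is the Claim_ definition above) =====
theorem settle_apples_py_spec : Claim_equal_settle_apples_py := by
  intro board _dom pre
  unfold Spec_settle_apples_py settle_apples_py settle_apples_py_alt
  have hfuel : MaxB (board.headD []).length board <
      (board.map (fun c => c.length * c.length)).sum + 1 + PhiB (board.headD []).length board := by
    have := MaxB_le_fuel (board.headD []).length board
    omega
  rw [loop_eq _ _ _ hfuel]
  refine List.map_congr_left fun col hcol => ?_
  rw [settleColAlt_eq _ _ (pre col hcol)]
  rfl
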